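-- pv_equiv track=rewrite | github.com/qwl2333/leetcode-py3 | Companies/Microsoft/OA/max-value-of-a-optimal-path.py | get_max_value_over_a_optimal_path
-- ===== SOURCE A (Python) =====
-- def get_max_value_over_a_optimal_path(A: list[int], B: list[int]) -> int:
--     m = len(A)
--     dp = [[(0, 0) for _ in range(m)] for _ in range(2)] # dp[i][j]: (min_sum, max_valuie),
--                                                         # min_sum is min sum from (0,0) -> (i, j),
--                                                         # max_value is max value in the path
--
--     '''
--     grid combined by A and B:
--         [
--             [-5, -1, -3],
--             [-5, 5, -2]
--         ]
--
--     dp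
--         [
--             [(-5, -5), (-6, -1), (-9, -1)],
--             [(-10, -5), (-5, 5), (-11, -1)]
--         ]
--
--     -11 is min sum of the path, -1 is the max value of this path
--     '''
--
--     for i in range(2):
--         for j in range(m):
--             if i == 0 and j == 0:
--                 dp[0][0] = (A[0], A[0])
--             elif i == 0:
--                 dp[i][j] = (dp[i][j - 1][0] + A[j], max(dp[i][j - 1][1], A[j]))
--             elif j == 0:
--                 dp[i][j] = (dp[i - 1][j][0] + B[j], max(dp[i - 1][j][1], B[j]))
--             else:
--                 if dp[i - 1][j][0] < dp[i][j - 1][0]: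
--                     dp[i][j] = (dp[i - 1][j][0] + B[j], max(dp[i - 1][j][1], B[j]))
--                 elif dp[i - 1][j][0] > dp[i][j - 1][0]:
--                     dp[i][j] = ((dp[i][j - 1][0] + B[j], max(dp[i][j - 1][1], B[j])))
--                 else: # dp[i - 1][j][0] == dp[i][j - 1][0]
--                     dp[i][j] = ((dp[i][j - 1][0] + B[j], max(dp[i][j - 1][1], dp[i - 1][j][1], B[j])))
--
--     return dp[1][m - 1][1]
-- ===== SOURCE B (Python) =====
-- def get_max_value_over_a_optimal_path(A: list[int], B: list[int]) -> int:
--     # Every monotone path drops from row 0 to row 1 at exactly one column k: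
--     # it covers A[0..k] then B[k..m-1].  Scan A for prefix (sum, max) pairs and
--     # the relevant part of B for suffix (sum, max) pairs, then pick, over all
--     # drop columns k with minimal total sum, the maximal value seen on the path.
--     m = len(A)
--     pre = []
--     s, mx = 0, A[0]
--     for a in A:
--         s += a
--         mx = max(mx, a)
--         pre.append((s, mx))
--     suf = []
--     s, mx = 0, B[m - 1]
--     for b in reversed(B[:m]):
--         s += b
--         mx = max(mx, b)
--         suf.append((s, mx))
--     suf.reverse()
--     best_s = pre[0][0] + suf[0][0]
--     best_m = max(pre[0][1], suf[0][1])
--     for (ps, pm), (ss, sm) in zip(pre[1:], suf[1:]):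
--         t = ps + ss
--         if t < best_s:
--             best_s, best_m = t, max(pm, sm)
--         elif t == best_s:
--             best_m = max(best_m, max(pm, sm))
--     return best_m
-- ===== Notes on version B (the rewrite author's own statement) =====
-- stated objective: alternative
-- what changed: Replaced the 2xM tuple DP table with a drop-column scan: prefix (sum,max) pairs over A and suffix (sum,max) pairs over B, then one pass picking, among all drop columns of minimal total sum, the maximal value on the path.
import Mathlib
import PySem

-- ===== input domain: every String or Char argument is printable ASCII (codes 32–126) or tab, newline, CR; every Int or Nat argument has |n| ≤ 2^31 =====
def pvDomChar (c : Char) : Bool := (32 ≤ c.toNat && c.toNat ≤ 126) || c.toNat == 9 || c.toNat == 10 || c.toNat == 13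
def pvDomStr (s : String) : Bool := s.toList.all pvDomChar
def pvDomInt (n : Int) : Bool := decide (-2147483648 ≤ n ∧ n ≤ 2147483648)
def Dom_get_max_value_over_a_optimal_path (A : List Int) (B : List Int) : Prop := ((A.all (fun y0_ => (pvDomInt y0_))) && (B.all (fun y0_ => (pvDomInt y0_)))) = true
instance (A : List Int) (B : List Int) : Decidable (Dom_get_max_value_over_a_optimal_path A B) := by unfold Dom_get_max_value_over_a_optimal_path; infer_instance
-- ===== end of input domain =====

-- B replaces A's 2×m tuple-DP table with a drop-column scan (prefix pairs over A, suffix pairs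
-- over B, then one argmin-tie-max pass); same O(m) result, different structure (objective: alternative).

-- ===== PORT A =====
-- A-side helper: the body of A's nested `for i in range(2): for j in range(m)` loop,
-- transcribed branch for branch (dp[i][j] reads/writes via pyGetD/pySetD).
def pvBodyA (A B : List Int) (dp : List (List (Int × Int))) (i j : Int) : List (List (Int × Int)) :=
  if i = 0 ∧ j = 0 then
    PySem.List.pySetD dp 0 (PySem.List.pySetD (PySem.List.pyGetD dp 0 []) 0
      (PySem.List.pyGetD A 0 0, PySem.List.pyGetD A 0 0))
  else if i = 0 then
    PySem.List.pySetD dp i (PySem.List.pySetD (PySem.List.pyGetD dp i []) j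
      ((PySem.List.pyGetD (PySem.List.pyGetD dp i []) (j - 1) (0, 0)).1 + PySem.List.pyGetD A j 0,
       max (PySem.List.pyGetD (PySem.List.pyGetD dp i []) (j - 1) (0, 0)).2 (PySem.List.pyGetD A j 0)))
  else if j = 0 then
    PySem.List.pySetD dp i (PySem.List.pySetD (PySem.List.pyGetD dp i []) j
      ((PySem.List.pyGetD (PySem.List.pyGetD dp (i - 1) []) j (0, 0)).1 + PySem.List.pyGetD B j 0,
       max (PySem.List.pyGetD (PySem.List.pyGetD dp (i - 1) []) j (0, 0)).2 (PySem.List.pyGetD B j 0)))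
  else
    if (PySem.List.pyGetD (PySem.List.pyGetD dp (i - 1) []) j (0, 0)).1
        < (PySem.List.pyGetD (PySem.List.pyGetD dp i []) (j - 1) (0, 0)).1 then
      PySem.List.pySetD dp i (PySem.List.pySetD (PySem.List.pyGetD dp i []) j
        ((PySem.List.pyGetD (PySem.List.pyGetD dp (i - 1) []) j (0, 0)).1 + PySem.List.pyGetD B j 0,
         max (PySem.List.pyGetD (PySem.List.pyGetD dp (i - 1) []) j (0, 0)).2 (PySem.List.pyGetD B j 0)))
    else if (PySem.List.pyGetD (PySem.List.pyGetD dp (i - 1) []) j (0, 0)).1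
        > (PySem.List.pyGetD (PySem.List.pyGetD dp i []) (j - 1) (0, 0)).1 then
      PySem.List.pySetD dp i (PySem.List.pySetD (PySem.List.pyGetD dp i []) j
        ((PySem.List.pyGetD (PySem.List.pyGetD dp i []) (j - 1) (0, 0)).1 + PySem.List.pyGetD B j 0,
         max (PySem.List.pyGetD (PySem.List.pyGetD dp i []) (j - 1) (0, 0)).2 (PySem.List.pyGetD B j 0)))
    else
      PySem.List.pySetD dp i (PySem.List.pySetD (PySem.List.pyGetD dp i []) j
        ((PySem.List.pyGetD (PySem.List.pyGetD dp i []) (j - 1) (0, 0)).1 + PySem.List.pyGetD B j 0,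
         max (max (PySem.List.pyGetD (PySem.List.pyGetD dp i []) (j - 1) (0, 0)).2
                  (PySem.List.pyGetD (PySem.List.pyGetD dp (i - 1) []) j (0, 0)).2)
             (PySem.List.pyGetD B j 0)))

def get_max_value_over_a_optimal_path (A B : List Int) : Int :=
  let m : Int := (A.length : Int)
  let dp : List (List (Int × Int)) :=
    (PySem.List.pyRange 0 2 1).map (fun _ => (PySem.List.pyRange 0 m 1).map (fun _ => ((0:Int),(0:Int))))
  let dp := (PySem.List.pyRange 0 2 1).foldl (fun dp i =>
      (PySem.List.pyRange 0 m 1).foldl (fun dp j => pvBodyA A B dp i j) dp) dp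
  (PySem.List.pyGetD (PySem.List.pyGetD dp 1 []) (m - 1) (0, 0)).2


-- ===== PORT B =====
def get_max_value_over_a_optimal_path_alt (A B : List Int) : Int :=
  let m : Int := (A.length : Int)
  let pre := (A.foldl (fun (st : Int × Int × List (Int × Int)) a =>
      let s := st.1 + a
      let mx := max st.2.1 a
      (s, mx, st.2.2 ++ [(s, mx)])) (0, PySem.List.pyGetD A 0 0, [])).2.2
  let suf0 := ((PySem.List.slice B none (some m)).reverse.foldl
      (fun (st : Int × Int × List (Int × Int)) b =>
      let s := st.1 + b
      let mx := max st.2.1 b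
      (s, mx, st.2.2 ++ [(s, mx)])) (0, PySem.List.pyGetD B (m - 1) 0, [])).2.2
  let suf := suf0.reverse
  let p0 := pre.headD (0, 0)
  let s0 := suf.headD (0, 0)
  let init := (p0.1 + s0.1, max p0.2 s0.2)
  let res := (List.zip (PySem.List.slice pre (some 1) none) (PySem.List.slice suf (some 1) none)).foldl
      (fun (st : Int × Int) pq =>
        if pq.1.1 + pq.2.1 < st.1 then (pq.1.1 + pq.2.1, max pq.1.2 pq.2.2)
        else if pq.1.1 + pq.2.1 = st.1 then (st.1, max st.2 (max pq.1.2 pq.2.2))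
        else st) init
  res.2


-- ===== PRECONDITION & SPEC =====
-- Pre_ excludes exactly the inputs where the Python A raises IndexError:
-- empty A (dp[1][m-1] on an empty row) and len(B) < len(A) (B[j] out of range).
def Pre_get_max_value_over_a_optimal_path (A : List Int) (B : List Int) : Prop :=
  A ≠ [] ∧ A.length ≤ B.length
instance (A : List Int) (B : List Int) : Decidable (Pre_get_max_value_over_a_optimal_path A B) := by
  unfold Pre_get_max_value_over_a_optimal_path; infer_instance
def pvWitness_get_max_value_over_a_optimal_path : List Int × List Int := ([-5, -1, -3], [-5, 5, -2])
def Spec_get_max_value_over_a_optimal_path (A : List Int) (B : List Int) (out : Int) : Prop :=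
  out = get_max_value_over_a_optimal_path_alt A B
instance (A : List Int) (B : List Int) (out : Int) : Decidable (Spec_get_max_value_over_a_optimal_path A B out) := by
  unfold Spec_get_max_value_over_a_optimal_path; infer_instance

-- ===== CLAIM (what is proved, stated in full; the proofs are below) =====
def Claim_equal_get_max_value_over_a_optimal_path : Prop :=
  ∀ (A : List Int) (B : List Int), Dom_get_max_value_over_a_optimal_path A B →
    Pre_get_max_value_over_a_optimal_path A B →
    Spec_get_max_value_over_a_optimal_path A B (get_max_value_over_a_optimal_path A B)

-- ===== LEMMAS AND PROOFS =====

def ppScan (s mx : Int) : List Int → List (Int × Int)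
  | [] => []
  | a :: as => (s + a, max mx a) :: ppScan (s + a) (max mx a) as

def stepMin (st c : Int × Int) : Int × Int :=
  if c.1 < st.1 then c else if c.1 = st.1 then (st.1, max st.2 c.2) else st

def stepCell (st u : Int × Int) (b : Int) : Int × Int :=
  if u.1 < st.1 then (u.1 + b, max u.2 b)
  else if st.1 < u.1 then (st.1 + b, max st.2 b)
  else (st.1 + b, max (max st.2 u.2) b)

def row1 (st : Int × Int) : List ((Int × Int) × Int) → List (Int × Int)
  | [] => []
  | ub :: rest => stepCell st ub.1 ub.2 :: row1 (stepCell st ub.1 ub.2) rest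

def shiftL (bs : List Int) (p : Int × Int) : Int × Int := (p.1 + bs.sum, bs.foldl max p.2)

def cands : List ((Int × Int) × Int) → List (Int × Int)
  | [] => []
  | ub :: rest => shiftL (ub.2 :: rest.map (·.2)) ub.1 :: cands rest

def combine (pq : (Int × Int) × (Int × Int)) : Int × Int := (pq.1.1 + pq.2.1, max pq.1.2 pq.2.2)

def sufPM (mx : Int) : List Int → List (Int × Int)
  | [] => []
  | b :: bs => (bs.reverse.sum + b, max (bs.reverse.foldl max mx) b) :: sufPM mx bs

-- basic scan facts
theorem ppScan_foldl (l : List Int) : ∀ (s mx : Int) (acc : List (Int × Int)),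
    (l.foldl (fun (st : Int × Int × List (Int × Int)) a =>
      (st.1 + a, max st.2.1 a, st.2.2 ++ [(st.1 + a, max st.2.1 a)])) (s, mx, acc)).2.2
    = acc ++ ppScan s mx l := by
  induction l with
  | nil => simp [ppScan]
  | cons a as ih => intro s mx acc; simp [ppScan, ih, List.append_assoc]

theorem length_ppScan (l : List Int) : ∀ s mx, (ppScan s mx l).length = l.length := by
  induction l with
  | nil => simp [ppScan]
  | cons a as ih => intro s mx; simp [ppScan, ih]

theorem ppScan_append (l₁ l₂ : List Int) : ∀ s mx,
    ppScan s mx (l₁ ++ l₂) = ppScan s mx l₁ ++ ppScan (s + l₁.sum) (l₁.foldl max mx) l₂ := by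
  induction l₁ with
  | nil => simp [ppScan]
  | cons a as ih => intro s mx; simp [ppScan, ih, add_assoc]

theorem ppScan_rev_eq_sufPM (l : List Int) (mx : Int) :
    (ppScan 0 mx l.reverse).reverse = sufPM mx l := by
  induction l with
  | nil => simp [ppScan, sufPM]
  | cons b bs ih =>
      have h : (b :: bs).reverse = bs.reverse ++ [b] := by simp
      rw [sufPM, h, ppScan_append]
      simp [ppScan, ih]

-- foldl max algebra
theorem foldl_max_seed (l : List Int) : ∀ x y, l.foldl max (max x y) = max x (l.foldl max y) := by
  induction l with
  | nil => intro x y; rfl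
  | cons a t ih => intro x y; simp only [List.foldl_cons, max_assoc]; exact ih x (max y a)

theorem foldl_max_absorb (l : List Int) : ∀ (b : Int), b ∈ l → ∀ x, l.foldl max (max x b) = l.foldl max x := by
  induction l with
  | nil => intro b hb; cases hb
  | cons a t ih =>
      intro b hb x
      rcases List.mem_cons.mp hb with rfl | hb
      · simp only [List.foldl_cons]
        have h2 : max (max x b) b = max x b := by rw [max_assoc, max_self]
        rw [h2]
      · simp only [List.foldl_cons]
        rw [max_right_comm x b a]
        exact ih b hb (max x a)

theorem foldl_max_reverse (l : List Int) (x : Int) : l.reverse.foldl max x = l.foldl max x := by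
  induction l generalizing x with
  | nil => rfl
  | cons a t ih =>
      simp only [List.reverse_cons, List.foldl_append, List.foldl_cons, List.foldl_nil, ih]
      rw [max_comm x a, foldl_max_seed, max_comm]

-- mx ∈ l → max c (l.foldl max mx) = l.foldl max c
theorem foldl_max_mem_seed (l : List Int) (b : Int) (hb : b ∈ l) (c : Int) :
    max c (l.foldl max b) = l.foldl max c := by
  rw [← foldl_max_seed]
  exact foldl_max_absorb l b hb c


-- shifting commutes with stepMin
theorem stepMin_shift (x y : Int × Int) (c d : Int) :
    ((stepMin x y).1 + c, max (stepMin x y).2 d)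
      = stepMin (x.1 + c, max x.2 d) (y.1 + c, max y.2 d) := by
  unfold stepMin
  rcases lt_trichotomy y.1 x.1 with h | h | h
  · simp [h]
  · simp [h]
  · simp [not_lt.mpr (le_of_lt h), (ne_of_gt h)]

theorem shiftL_cons (b : Int) (bs : List Int) (p : Int × Int) :
    shiftL (b :: bs) p = shiftL bs (p.1 + b, max p.2 b) := by
  simp [shiftL, add_assoc]

theorem shiftL_stepMin (bs : List Int) : ∀ (x y : Int × Int),
    shiftL bs (stepMin x y) = stepMin (shiftL bs x) (shiftL bs y) := by
  induction bs with
  | nil => intro x y; simp [shiftL]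
  | cons b bs ih =>
      intro x y
      rw [shiftL_cons, shiftL_cons, shiftL_cons, stepMin_shift, ih]

theorem stepCell_eq (st u : Int × Int) (b : Int) :
    stepCell st u b = stepMin (st.1 + b, max st.2 b) (u.1 + b, max u.2 b) := by
  unfold stepCell stepMin
  rcases lt_trichotomy u.1 st.1 with h | h | h
  · simp [h]
  · simp [h]
  · simp [not_lt.mpr (le_of_lt h), (ne_of_gt h)]
    exact fun h2 => absurd h2 (not_le.mpr h)

-- THE BRIDGE
theorem bridge (ubs : List ((Int × Int) × Int)) : ∀ (st : Int × Int),
    (row1 st ubs).getLastD st = (cands ubs).foldl stepMin (shiftL (ubs.map (·.2)) st) := by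
  induction ubs with
  | nil => intro st; simp [row1, cands, shiftL]
  | cons ub rest ih =>
      intro ⟨s1, s2⟩
      obtain ⟨⟨u1, u2⟩, b⟩ := ub
      rw [row1, List.getLastD_cons, ih, stepCell_eq]
      simp only [cands, List.foldl_cons, List.map_cons]
      rw [shiftL_stepMin, shiftL_cons, shiftL_cons]

theorem last_foldl (bs' : List Int) (c b0 : Int) (h : (c :: bs').getLast? = some b0) :
    max (bs'.reverse.foldl max b0) c = bs'.foldl max c := by
  rw [foldl_max_reverse]
  rcases List.eq_nil_or_concat bs' with rfl | ⟨l, x, rfl⟩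
  · simp only [List.getLast?_singleton, Option.some.injEq] at h
    subst h; simp
  · simp only [List.concat_eq_append] at *
    have hx : (c :: (l ++ [x])).getLast? = some x := by
      rw [show c :: (l ++ [x]) = (c :: l) ++ [x] from rfl, List.getLast?_concat]
    rw [h] at hx
    obtain rfl : b0 = x := by injection hx
    have hb0 : b0 ∈ l ++ [b0] := by simp
    rw [max_comm]
    exact foldl_max_mem_seed _ b0 hb0 c

theorem headEq (u : Int × Int) (c b0 : Int) (bs' : List Int)
    (h : (c :: bs').getLast? = some b0) :
    shiftL (c :: bs') u
      = combine (u, (bs'.reverse.sum + c, max (bs'.reverse.foldl max b0) c)) := by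
  simp only [combine, shiftL, List.sum_cons, List.foldl_cons, List.sum_reverse, Prod.mk.injEq]
  constructor
  · ring
  · rw [foldl_max_seed, last_foldl bs' c b0 h]

theorem cands_zip (bs : List Int) : ∀ (ps : List (Int × Int)) (b0 : Int),
    ps.length = bs.length → (bs.getLast? = some b0 ∨ bs = []) →
    cands (ps.zip bs) = (ps.zip (sufPM b0 bs)).map combine := by
  induction bs with
  | nil => intro ps b0 _ _; simp [cands, sufPM]
  | cons c bs' ih =>
      intro ps b0 hlen hlast
      match ps with
      | [] => simp at hlen
      | u :: ps' =>
        simp only [List.length_cons] at hlen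
        have hmap : (ps'.zip bs').map (·.2) = bs' := by
          apply List.map_snd_zip
          omega
        have hl : (c :: bs').getLast? = some b0 := by tauto
        simp only [List.zip_cons_cons, cands, sufPM, List.map_cons, hmap, List.cons.injEq]
        refine ⟨headEq u c b0 bs' hl, ?_⟩
        apply ih ps' b0 (by omega)
        rcases List.eq_nil_or_concat bs' with rfl | ⟨l, x, rfl⟩
        · right; rfl
        · left
          simp only [List.concat_eq_append] at *
          rw [← hl, show c :: (l ++ [x]) = (c :: l) ++ [x] from rfl,
              List.getLast?_concat, List.getLast?_concat]

theorem length_row1 (zs : List ((Int × Int) × Int)) : ∀ st, (row1 st zs).length = zs.length := by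
  induction zs with
  | nil => intro st; rfl
  | cons ub rest ih => intro st; simp [row1, ih]

theorem ppScan_take_succ (l : List Int) : ∀ (s mx : Int) (t : Nat), t < l.length →
    ppScan s mx (l.take (t + 1))
      = ppScan s mx (l.take t)
        ++ [(((ppScan s mx (l.take t)).getLastD (s, mx)).1 + l.getD t 0,
             max ((ppScan s mx (l.take t)).getLastD (s, mx)).2 (l.getD t 0))] := by
  induction l with
  | nil => intro s mx t ht; simp at ht
  | cons a as ih =>
      intro s mx t ht
      cases t with
      | zero => simp [ppScan]
      | succ t' =>
          simp only [List.take_succ_cons, ppScan, List.getLastD_cons, List.getD_cons_succ]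
          rw [ih (s + a) (max mx a) t' (by simpa using ht)]
          simp

theorem row1_take_succ (zs : List ((Int × Int) × Int)) :
    ∀ (st : Int × Int) (t : Nat), t < zs.length →
    (row1 st zs).take (t + 1)
      = (row1 st zs).take t
        ++ [stepCell (((row1 st zs).take t).getLastD st)
              (zs.getD t ((0,0),0)).1 (zs.getD t ((0,0),0)).2] := by
  induction zs with
  | nil => intro st t ht; simp at ht
  | cons ub rest ih =>
      intro st t ht
      cases t with
      | zero => simp [row1]
      | succ t' =>
          simp only [row1, List.take_succ_cons, List.getLastD_cons, List.getD_cons_succ]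
          rw [ih (stepCell st ub.1 ub.2) t' (by simpa using ht)]
          simp

-- glue lemmas
theorem getLastD_congr (l : List (Int × Int)) (h : l ≠ []) (d d' : Int × Int) :
    l.getLastD d = l.getLastD d' := by
  induction l with
  | nil => exact absurd rfl h
  | cons x xs ih =>
      cases xs with
      | nil => rfl
      | cons y ys => simp only [List.getLastD_cons]

theorem getD_last (l : List (Int × Int)) (h : l ≠ []) (d : Int × Int) :
    l.getD (l.length - 1) d = l.getLastD d := by
  induction l with
  | nil => exact absurd rfl h
  | cons x xs ih =>
      cases xs with
      | nil => rfl
      | cons y ys =>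
          have hlen : (x :: y :: ys : List _).length - 1 = ((y :: ys : List _).length - 1) + 1 := by
            simp
          rw [hlen, List.getD_cons_succ, ih (by simp)]
          simp

theorem zip_getD {α β : Type} (l1 : List α) : ∀ (l2 : List β) (k : Nat) (d1 : α) (d2 : β),
    k < l1.length → k < l2.length →
    (l1.zip l2).getD k (d1, d2) = (l1.getD k d1, l2.getD k d2) := by
  induction l1 with
  | nil => intro l2 k d1 d2 h1 h2; simp at h1
  | cons x xs ih =>
      intro l2 k d1 d2 h1 h2
      cases l2 with
      | nil => simp at h2
      | cons y ys =>
          cases k with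
          | zero => rfl
          | succ k' => simp only [List.zip_cons_cons, List.getD_cons_succ]
                       exact ih ys k' d1 d2 (by simpa using h1) (by simpa using h2)

theorem tail_getD {α : Type} (l : List α) (t : Nat) (d : α) (ht : 1 ≤ t) :
    l.tail.getD (t - 1) d = l.getD t d := by
  cases l with
  | nil => simp
  | cons x xs => cases t with
      | zero => omega
      | succ t' => simp

theorem take_getD {α : Type} (l : List α) (n t : Nat) (d : α) (ht : t < n) :
    (l.take n).getD t d = l.getD t d := by
  simp [List.getD_eq_getElem?_getD, ht]

theorem init_row (n : Nat) :
    (PySem.List.pyRange 0 (n : Int) 1).map (fun _ => ((0:Int),(0:Int)))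
      = List.replicate n ((0:Int),(0:Int)) := by
  rw [PySem.List.pyRange_one]
  simp [Function.comp_def, List.map_const']

theorem pyRange02 : PySem.List.pyRange 0 2 1 = [0, 1] := by decide

theorem set_append_right {α : Type} (P D : List α) (v : α) :
    (P ++ D).set P.length v = P ++ D.set 0 v := by
  induction P with
  | nil => simp
  | cons x xs ih => simp [ih]

theorem row0_inv (a : Int) (as B : List Int) (r1 : List (Int × Int)) :
    ∀ (t : Nat), 1 ≤ t → t ≤ (a :: as : List Int).length →
    (PySem.List.pyRange 0 (t : Int) 1).foldl (fun dp j => pvBodyA (a :: as) B dp 0 j)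
      [List.replicate (a :: as : List Int).length ((0:Int),(0:Int)), r1]
    = [ppScan 0 a ((a :: as).take t)
        ++ (List.replicate (a :: as : List Int).length ((0:Int),(0:Int))).drop t, r1] := by
  intro t
  induction t with
  | zero => omega
  | succ t' ih =>
      intro _ hle
      rcases Nat.eq_zero_or_pos t' with rfl | ht'
      · -- t = 1
        simp only [show ((0 + 1 : Nat) : Int) = 1 by norm_num,
                   show PySem.List.pyRange 0 1 1 = [0] by decide]
        simp [pvBodyA, ppScan, List.replicate_succ, PySem.List.pySetD_of_nonneg]
      · -- t' ≥ 1
        have hcast : ((t' + 1 : Nat) : Int) = (t' : Int) + 1 := by push_cast; ring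
        rw [hcast, PySem.List.pyRange_one_succ_right (by positivity), List.foldl_append,
            ih ht' (by omega)]
        simp only [List.foldl_cons, List.foldl_nil]
        have hn : t' < (a :: as).length := by omega
        have hP : (ppScan 0 a ((a :: as).take t')).length = t' := by
          rw [length_ppScan, List.length_take]
          omega
        have hPne : ppScan 0 a ((a :: as).take t') ≠ [] := by
          intro hnil
          rw [hnil] at hP
          simp at hP; omega
        rw [pvBodyA, if_neg (by rintro ⟨_, h⟩; omega), if_pos rfl]
        simp only [PySem.List.pyGetD_zero_cons]
        rw [show ((t' : Nat) : Int) - 1 = ((t' - 1 : Nat) : Int) from by omega]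
        simp only [PySem.List.pyGetD_natCast, PySem.List.pySetD_natCast]
        rw [List.getD_append _ _ _ _ (by rw [hP]; omega)]
        have e4 := getD_last (ppScan 0 a ((a :: as).take t')) hPne ((0:Int),(0:Int))
        rw [hP] at e4
        rw [e4, getLastD_congr _ hPne ((0:Int),(0:Int)) ((0:Int), a)]
        rw [ppScan_take_succ (a :: as) 0 a t' hn]
        have hset : ∀ v : Int × Int, (ppScan 0 a ((a :: as).take t')
              ++ (List.replicate (a :: as).length ((0:Int),(0:Int))).drop t').set t' v
            = ppScan 0 a ((a :: as).take t')
              ++ ((List.replicate (a :: as).length ((0:Int),(0:Int))).drop t').set 0 v := by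
          intro v
          have h := set_append_right (ppScan 0 a ((a :: as).take t'))
            ((List.replicate (a :: as).length ((0:Int),(0:Int))).drop t') v
          rw [hP] at h
          exact h
        rw [hset]
        have hrep : (List.replicate (a :: as).length ((0:Int),(0:Int))).drop t'
            = ((0:Int),(0:Int)) :: List.replicate ((a :: as).length - (t' + 1)) ((0:Int),(0:Int)) := by
          rw [List.drop_replicate,
              show (a :: as).length - t' = ((a :: as).length - (t' + 1)) + 1 from by omega,
              List.replicate_succ]
        rw [hrep]
        simp [PySem.List.pySetD_of_nonneg, List.drop_replicate,
]

theorem pvBodyA_one (A B : List Int) (dp : List (List (Int × Int))) (j : Int) (hj : j ≠ 0) :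
    pvBodyA A B dp 1 j
      = PySem.List.pySetD dp 1 (PySem.List.pySetD (PySem.List.pyGetD dp 1 []) j
          (stepCell (PySem.List.pyGetD (PySem.List.pyGetD dp 1 []) (j - 1) (0,0))
                    (PySem.List.pyGetD (PySem.List.pyGetD dp 0 []) j (0,0))
                    (PySem.List.pyGetD B j 0))) := by
  rw [pvBodyA, if_neg (by rintro ⟨h, _⟩; norm_num at h), if_neg (by norm_num), if_neg hj]
  simp only [stepCell, gt_iff_lt, show (1:Int) - 1 = 0 from by norm_num]
  split_ifs <;> rfl

theorem pvBodyA_one_zero (A B : List Int) (dp : List (List (Int × Int))) :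
    pvBodyA A B dp 1 0
      = PySem.List.pySetD dp 1 (PySem.List.pySetD (PySem.List.pyGetD dp 1 []) 0
          ((PySem.List.pyGetD (PySem.List.pyGetD dp 0 []) 0 (0,0)).1 + PySem.List.pyGetD B 0 0,
           max (PySem.List.pyGetD (PySem.List.pyGetD dp 0 []) 0 (0,0)).2 (PySem.List.pyGetD B 0 0))) := by
  rw [pvBodyA, if_neg (by rintro ⟨h, _⟩; norm_num at h), if_neg (by norm_num), if_pos rfl]
  norm_num

theorem getD2_one {α : Type} (x y : List α) : PySem.List.pyGetD [x, y] (1:Int) ([] : List α) = y := rfl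
theorem setD2_one {α : Type} (x y r : List α) : PySem.List.pySetD [x, y] (1:Int) r = [x, r] := rfl

theorem row1_inv (a : Int) (as B : List Int) (hB : (a :: as : List Int).length ≤ B.length)
    (pre : List (Int × Int)) (hpre : pre = ppScan 0 a (a :: as))
    (v0 : Int × Int)
    (hv0 : v0 = ((pre.getD 0 ((0:Int),(0:Int))).1 + B.getD 0 0,
                 max (pre.getD 0 ((0:Int),(0:Int))).2 (B.getD 0 0)))
    (zs : List ((Int × Int) × Int))
    (hzs : zs = pre.tail.zip ((B.take (a :: as : List Int).length).tail)) :
    ∀ (t : Nat), 1 ≤ t → t ≤ (a :: as : List Int).length →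
    (PySem.List.pyRange 0 (t : Int) 1).foldl (fun dp j => pvBodyA (a :: as) B dp 1 j)
      [pre, List.replicate (a :: as : List Int).length ((0:Int),(0:Int))]
    = [pre, (v0 :: row1 v0 zs).take t
        ++ (List.replicate (a :: as : List Int).length ((0:Int),(0:Int))).drop t] := by
  have hlpre : pre.length = (a :: as : List Int).length := by rw [hpre, length_ppScan]
  have hlzs : zs.length = (a :: as : List Int).length - 1 := by
    rw [hzs, List.length_zip, List.length_tail, List.length_tail, List.length_take, hlpre]
    omega
  have hlR : (v0 :: row1 v0 zs).length = (a :: as : List Int).length := by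
    simp only [List.length_cons, length_row1, hlzs]
    omega
  intro t
  induction t with
  | zero => omega
  | succ t' ih =>
      intro _ hle
      rcases Nat.eq_zero_or_pos t' with rfl | ht'
      · simp only [show ((0 + 1 : Nat) : Int) = 1 by norm_num,
                   show PySem.List.pyRange 0 1 1 = [0] by decide]
        simp only [List.foldl_cons, List.foldl_nil]
        rw [pvBodyA_one_zero]
        simp only [PySem.List.pyGetD_zero,
                   show PySem.List.pyGetD ([pre, List.replicate (a :: as : List Int).length ((0:Int),(0:Int))] : List (List (Int × Int))) (1:Int) [] = List.replicate (a :: as : List Int).length ((0:Int),(0:Int)) from rfl,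
                   show ∀ r : List (Int × Int), PySem.List.pySetD ([pre, List.replicate (a :: as : List Int).length ((0:Int),(0:Int))] : List (List (Int × Int))) (1:Int) r = [pre, r] from fun r => rfl]
        simp only [List.getD_cons_zero]
        rw [← hv0]
        simp [PySem.List.pySetD_of_nonneg, List.replicate_succ]
      · have hcast : ((t' + 1 : Nat) : Int) = (t' : Int) + 1 := by push_cast; ring
        rw [hcast, PySem.List.pyRange_one_succ_right (by positivity), List.foldl_append,
            ih ht' (by omega)]
        simp only [List.foldl_cons, List.foldl_nil]
        rw [pvBodyA_one _ _ _ _ (by intro h; rw [Int.natCast_eq_zero] at h; omega)]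
        have hRt : ((v0 :: row1 v0 zs).take t').length = t' := by
          rw [List.length_take]; omega
        have hRne : (v0 :: row1 v0 zs).take t' ≠ [] := by
          intro hnil; rw [hnil] at hRt; simp at hRt; omega
        rw [getD2_one, setD2_one]
        simp only [PySem.List.pyGetD_zero_cons]
        rw [show ((t' : Nat) : Int) - 1 = ((t' - 1 : Nat) : Int) from by omega]
        simp only [PySem.List.pyGetD_natCast, PySem.List.pySetD_natCast]
        rw [List.getD_append _ _ _ _ (by rw [hRt]; omega)]
        have e4 := getD_last ((v0 :: row1 v0 zs).take t') hRne ((0:Int),(0:Int))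
        rw [hRt] at e4
        rw [e4]
        have hset : ∀ v : Int × Int, ((v0 :: row1 v0 zs).take t'
              ++ (List.replicate (a :: as : List Int).length ((0:Int),(0:Int))).drop t').set t' v
            = (v0 :: row1 v0 zs).take t'
              ++ (((List.replicate (a :: as : List Int).length ((0:Int),(0:Int))).drop t').set 0 v) := by
          intro v
          have h := set_append_right ((v0 :: row1 v0 zs).take t')
            ((List.replicate (a :: as : List Int).length ((0:Int),(0:Int))).drop t') v
          rw [hRt] at h
          exact h
        rw [hset]
        have hrep : (List.replicate (a :: as : List Int).length ((0:Int),(0:Int))).drop t'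
            = ((0:Int),(0:Int)) :: List.replicate ((a :: as : List Int).length - (t' + 1)) ((0:Int),(0:Int)) := by
          rw [List.drop_replicate,
              show (a :: as : List Int).length - t' = ((a :: as : List Int).length - (t' + 1)) + 1 from by omega,
              List.replicate_succ]
        rw [hrep]
        -- unfold take t' on both sides
        have hRt' : (v0 :: row1 v0 zs).take t' = v0 :: (row1 v0 zs).take (t' - 1) := by
          conv_lhs => rw [show t' = (t' - 1) + 1 from by omega]
          rw [List.take_succ_cons]
        have htake : (row1 v0 zs).take t'
            = (row1 v0 zs).take (t' - 1)
              ++ [stepCell (((row1 v0 zs).take (t' - 1)).getLastD v0)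
                    (zs.getD (t' - 1) (((0:Int),(0:Int)),(0:Int))).1
                    (zs.getD (t' - 1) (((0:Int),(0:Int)),(0:Int))).2] := by
          have h := row1_take_succ zs v0 (t' - 1) (by omega)
          rw [show t' - 1 + 1 = t' from by omega] at h
          exact h
        have hzget : zs.getD (t' - 1) (((0:Int),(0:Int)),(0:Int))
            = (pre.getD t' ((0:Int),(0:Int)), B.getD t' (0:Int)) := by
          rw [hzs, zip_getD _ _ _ _ _ (by rw [List.length_tail, hlpre]; omega)
                (by rw [List.length_tail, List.length_take]; omega),
              tail_getD _ _ _ (by omega), tail_getD _ _ _ (by omega),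
              take_getD _ _ _ _ (by omega)]
        rw [List.take_succ_cons, htake, hRt', hzget, List.getLastD_cons]
        simp

theorem portA_eq (a : Int) (as B : List Int) (hB : (a :: as : List Int).length ≤ B.length)
    (pre : List (Int × Int)) (hpre : pre = ppScan 0 a (a :: as))
    (v0 : Int × Int)
    (hv0 : v0 = ((pre.getD 0 ((0:Int),(0:Int))).1 + B.getD 0 0,
                 max (pre.getD 0 ((0:Int),(0:Int))).2 (B.getD 0 0)))
    (zs : List ((Int × Int) × Int))
    (hzs : zs = pre.tail.zip ((B.take (a :: as : List Int).length).tail)) :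
    get_max_value_over_a_optimal_path (a :: as) B = ((row1 v0 zs).getLastD v0).2 := by
  have hlpre : pre.length = (a :: as : List Int).length := by rw [hpre, length_ppScan]
  have hlzs : zs.length = (a :: as : List Int).length - 1 := by
    rw [hzs, List.length_zip, List.length_tail, List.length_tail, List.length_take, hlpre]
    omega
  have hlR : (v0 :: row1 v0 zs).length = (a :: as : List Int).length := by
    simp only [List.length_cons, length_row1, hlzs]
    omega
  have hn1 : 1 ≤ (a :: as : List Int).length := by simp
  simp only [get_max_value_over_a_optimal_path, pyRange02, List.map_cons, List.map_nil, List.foldl_cons, List.foldl_nil,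
             init_row]
  rw [row0_inv a as B _ (a :: as : List Int).length hn1 le_rfl]
  rw [List.take_length,
      show List.drop (a :: as : List Int).length (List.replicate (a :: as : List Int).length ((0:Int),(0:Int))) = [] from by simp,
      List.append_nil, ← hpre]
  rw [row1_inv a as B hB pre hpre v0 hv0 zs hzs (a :: as : List Int).length hn1 le_rfl]
  rw [show List.drop (a :: as : List Int).length (List.replicate (a :: as : List Int).length ((0:Int),(0:Int))) = [] from by simp,
      List.append_nil]
  have htk : (v0 :: row1 v0 zs).take (a :: as : List Int).length = v0 :: row1 v0 zs := by
    rw [← hlR, List.take_length]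
  rw [htk, getD2_one]
  rw [show ((a :: as : List Int).length : Int) - 1 = (((a :: as : List Int).length - 1 : Nat) : Int) from by
        push_cast [hn1]; omega]
  simp only [PySem.List.pyGetD_natCast]
  have e4 := getD_last (v0 :: row1 v0 zs) (by simp) ((0:Int),(0:Int))
  rw [hlR] at e4
  rw [e4, List.getLastD_cons]

theorem take_getLast? {α : Type} (l : List α) : ∀ (k : Nat) (d : α), 1 ≤ k → k ≤ l.length →
    (l.take k).getLast? = some (l.getD (k - 1) d) := by
  induction l with
  | nil => intro k d h1 h2; simp at h2; omega
  | cons x xs ih =>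
      intro k d h1 h2
      match k with
      | 1 => simp
      | (k' + 2) =>
          cases xs with
          | nil => simp at h2
          | cons y ys =>
              have h3 := ih (k' + 1) d (by omega) (by simp at h2 ⊢; omega)
              simp only [show k' + 1 - 1 = k' from rfl] at h3
              simp only [show k' + 2 - 1 = k' + 1 from rfl, List.getD_cons_succ,
                         List.take_succ_cons, List.getLast?_cons_cons]
              rw [← h3, List.take_succ_cons]

theorem foldBody_eq : (fun (st : Int × Int) (pq : (Int × Int) × (Int × Int)) =>
    if pq.1.1 + pq.2.1 < st.1 then (pq.1.1 + pq.2.1, max pq.1.2 pq.2.2)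
    else if pq.1.1 + pq.2.1 = st.1 then (st.1, max st.2 (max pq.1.2 pq.2.2))
    else st) = fun st pq => stepMin st (combine pq) := by
  funext st pq
  simp [stepMin, combine]

theorem portB_eq (a : Int) (as B : List Int) (hB : (a :: as : List Int).length ≤ B.length)
    (pre : List (Int × Int)) (hpre : pre = ppScan 0 a (a :: as))
    (v0 : Int × Int)
    (hv0 : v0 = ((pre.getD 0 ((0:Int),(0:Int))).1 + B.getD 0 0,
                 max (pre.getD 0 ((0:Int),(0:Int))).2 (B.getD 0 0)))
    (zs : List ((Int × Int) × Int))
    (hzs : zs = pre.tail.zip ((B.take (a :: as : List Int).length).tail)) :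
    get_max_value_over_a_optimal_path_alt (a :: as) B = ((cands zs).foldl stepMin (shiftL (zs.map (·.2)) v0)).2 := by
  obtain ⟨c0, B'', rfl⟩ : ∃ c B'', B = c :: B'' := by
    cases B with
    | nil => simp at hB
    | cons c B'' => exact ⟨c, B'', rfl⟩
  simp only [get_max_value_over_a_optimal_path_alt]
  rw [ppScan_foldl, PySem.List.slice_to_natCast, ppScan_foldl,
      PySem.List.slice_from_one, PySem.List.slice_from_one]
  simp only [List.nil_append, PySem.List.pyGetD_zero_cons]
  rw [show ((a :: as : List Int).length : Int) - 1 = (((a :: as : List Int).length - 1 : Nat) : Int) from by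
        have h9 : 1 ≤ (a :: as : List Int).length := by simp
        omega]
  simp only [PySem.List.pyGetD_natCast]
  rw [ppScan_rev_eq_sufPM, foldBody_eq, ← List.foldl_map]
  -- name the pieces
  set n : Nat := (a :: as : List Int).length with hn
  have hn1 : 1 ≤ n := by simp [hn]
  set b0 : Int := (c0 :: B'').getD (n - 1) 0 with hb0
  have htk : (c0 :: B'').take n = c0 :: B''.take (n - 1) := by
    rw [show n = (n - 1) + 1 from by omega, List.take_succ_cons]
    simp
  set bs' : List Int := B''.take (n - 1) with hbs'
  rw [htk]
  simp only [sufPM]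
  set s0 : Int × Int := (bs'.reverse.sum + c0, max (bs'.reverse.foldl max b0) c0) with hs0
  -- tails and heads
  simp only [ppScan, List.headD_cons, List.tail_cons]
  set p0 : Int × Int := (0 + a, max a a) with hp0
  set ps : List (Int × Int) := ppScan (0 + a) (max a a) as with hps
  have hlps : ps.length = n - 1 := by rw [hps, length_ppScan]; simp [hn]
  have hlbs : bs'.length = n - 1 := by
    rw [hbs', List.length_take]
    simp only [List.length_cons] at hB
    omega
  have hzs2 : zs = ps.zip bs' := by
    rw [hzs, hpre, htk]
    simp [ppScan, hps, hbs']
  have hlastfull : (c0 :: bs').getLast? = some b0 := by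
    rw [← htk, hb0]
    exact take_getLast? (c0 :: B'') n 0 hn1 (by simpa using hB)
  -- candidates
  have hcands : cands zs = (ps.zip (sufPM b0 bs')).map combine := by
    rw [hzs2]
    apply cands_zip bs' ps b0 (by omega)
    rcases List.eq_nil_or_concat bs' with hnil | ⟨l, x, hc⟩
    · right; exact hnil
    · left
      rw [← hlastfull, hc]
      simp only [List.concat_eq_append]
      rw [show c0 :: (l ++ [x]) = (c0 :: l) ++ [x] from rfl,
          List.getLast?_concat, List.getLast?_concat]
  -- initial accumulator
  have hmap2 : zs.map (·.2) = bs' := by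
    rw [hzs2]
    apply List.map_snd_zip
    omega
  have hinit : shiftL (zs.map (·.2)) v0 = (p0.1 + s0.1, max p0.2 s0.2) := by
    rw [hmap2, hv0, hpre]
    simp only [ppScan, List.getD_cons_zero]
    calc shiftL bs' (0 + a + c0, max (max a a) c0)
        = shiftL (c0 :: bs') p0 := by rw [shiftL_cons, hp0]
      _ = combine (p0, s0) := by rw [headEq p0 c0 b0 bs' hlastfull, ← hs0]
      _ = (p0.1 + s0.1, max p0.2 s0.2) := rfl
  rw [hcands, hinit]

theorem main_eq (A B : List Int) (hA : A ≠ []) (hB : A.length ≤ B.length) :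
    get_max_value_over_a_optimal_path A B = get_max_value_over_a_optimal_path_alt A B := by
  obtain ⟨a, as, rfl⟩ := List.exists_cons_of_ne_nil hA
  rw [portA_eq a as B hB _ rfl _ rfl _ rfl, portB_eq a as B hB _ rfl _ rfl _ rfl, bridge]

-- ===== VERDICT (by name: the statement is the Claim_ definition above) =====
theorem get_max_value_over_a_optimal_path_spec : Claim_equal_get_max_value_over_a_optimal_path := by
  intro A B _ hPre
  unfold Spec_get_max_value_over_a_optimal_path
  exact main_eq A B hPre.1 hPre.2
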